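-- pv_equiv track=rewrite | github.com/guige2023/rabai_autoclick | actions/textwrap_action.py | prefix_width
-- ===== SOURCE A (Python) =====
-- def prefix_width(text: str) -> int:
--     """Get the common prefix width.
--
--     Args:
--         text: Text to analyze.
--
--     Returns:
--         Prefix width in characters.
--     """
--     lines = text.split("\n")
--     if not lines:
--         return 0
--
--     common = []
--     for chars in zip(*lines):
--         if len(set(chars)) == 1:
--             common.append(chars[0])
--         else:
--             break
--
--     return len("".join(common))
-- ===== SOURCE B (Python) =====
-- def prefix_width(text: str) -> int:
--     """Get the common prefix width.
--
--     Row-by-row: keep a running common prefix, shrinking it against each line.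
--     """
--     lines = text.split("\n")
--     prefix = lines[0]
--     for line in lines[1:]:
--         n = min(len(prefix), len(line))
--         i = 0
--         while i < n and prefix[i] == line[i]:
--             i += 1
--         prefix = prefix[:i]
--         if not prefix:
--             break
--     return len(prefix)
-- ===== Notes on version B (the rewrite author's own statement) =====
-- stated objective: simpler
-- what changed: Replaces A's column-by-column scan (zip(*lines) building tuple columns and a set-cardinality test per column) with a row-by-row loop that keeps one running common prefix and shrinks it against each line, breaking early once it is empty.
import Mathlib
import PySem

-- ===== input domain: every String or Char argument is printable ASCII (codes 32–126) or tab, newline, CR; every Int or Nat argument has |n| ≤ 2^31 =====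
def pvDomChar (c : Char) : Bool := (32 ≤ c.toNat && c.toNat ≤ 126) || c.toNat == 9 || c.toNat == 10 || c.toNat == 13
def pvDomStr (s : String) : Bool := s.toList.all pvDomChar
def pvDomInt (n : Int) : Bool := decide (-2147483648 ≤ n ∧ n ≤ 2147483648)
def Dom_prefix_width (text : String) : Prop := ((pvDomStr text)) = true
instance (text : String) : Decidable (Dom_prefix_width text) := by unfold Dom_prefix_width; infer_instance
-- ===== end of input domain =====

-- B replaces A's column-by-column zip(*lines)/set check with a running common prefix
-- shrunk line by line (objective: simpler; same return value on every input).

-- ===== PORT A =====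
-- zip(*lines): columns of the lines, cut at the shortest line
def pvZip (ls : List (List Char)) : List (List Char) :=
  if h : ls ≠ [] ∧ ∀ l ∈ ls, l ≠ [] then
    (ls.map (·.headD ' ')) :: pvZip (ls.map List.tail)
  else []
termination_by (ls.headD []).length
decreasing_by
  rcases ls with _ | ⟨a, ls'⟩
  · exact absurd rfl h.1
  · have ha : a ≠ [] := h.2 a (by simp)
    rcases a with _ | ⟨x, a'⟩
    · exact absurd rfl ha
    · simp

-- the 'for chars in zip(*lines)' loop with its break
def pvALoop : List (List Char) → List Char → List Char
  | [], common => common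
  | chars :: rest, common =>
      if PySem.Set.len (PySem.Set.ofList chars) = 1 then
        pvALoop rest (common ++ [((PySem.List.pyGet? chars (0 : Int)).getD ' ')])
      else common

def prefix_width (text : String) : Int :=
  let lines := PySem.Chars.splitOn text.toList ['\n']  -- text.split("\n")
  if lines = [] then 0
  else ((pvALoop (pvZip lines) []).length : Int)       -- len("".join(common))

-- ===== PORT B =====
-- the inner while loop: number of leading positions where prefix and line agree
def pvMismatch : List Char → List Char → Nat
  | a :: as, b :: bs => if a = b then pvMismatch as bs + 1 else 0
  | _, _ => 0

-- the 'for line in lines[1:]' loop with its break when the prefix empties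
def pvBLoop : List (List Char) → List Char → List Char
  | [], p => p
  | l :: rest, p =>
      let p' := p.take (pvMismatch p l)   -- prefix = prefix[:i]
      if p' = [] then p' else pvBLoop rest p'

def prefix_width_alt (text : String) : Int :=
  let lines := PySem.Chars.splitOn text.toList ['\n']           -- text.split("\n")
  let pref := ((PySem.List.pyGet? lines (0 : Int)).getD [])     -- lines[0] (split is never empty)
  ((pvBLoop (PySem.List.slice lines (some 1) none) pref).length : Int)

-- ===== PRECONDITION & SPEC =====
def Spec_prefix_width (text : String) (out : Int) : Prop := out = prefix_width_alt text
instance (text : String) (out : Int) : Decidable (Spec_prefix_width text out) := by unfold Spec_prefix_width; infer_instance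

-- ===== CLAIM (what is proved, stated in full; the proofs are below) =====
def Claim_equal_prefix_width : Prop := ∀ (text : String), Dom_prefix_width text → Spec_prefix_width text (prefix_width text)

-- ===== LEMMAS AND PROOFS =====
-- B's per-line shrink step, named for the proofs
def pvCp (p l : List Char) : List Char := p.take (pvMismatch p l)

theorem pvCp_nil_left (l : List Char) : pvCp [] l = [] := by
  cases l <;> simp [pvCp, pvMismatch]

theorem pvCp_nil_right (p : List Char) : pvCp p [] = [] := by
  cases p <;> simp [pvCp, pvMismatch]

theorem pvCp_cons (x y : Char) (p l : List Char) :
    pvCp (x :: p) (y :: l) = if x = y then x :: pvCp p l else [] := by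
  by_cases h : x = y <;> simp [pvCp, pvMismatch, h]

theorem foldl_pvCp_nil (t : List (List Char)) : t.foldl pvCp [] = [] := by
  induction t with
  | nil => rfl
  | cons l t ih => simp [List.foldl, pvCp_nil_left, ih]

theorem pvBLoop_eq_foldl (t : List (List Char)) (p : List Char) :
    pvBLoop t p = t.foldl pvCp p := by
  induction t generalizing p with
  | nil => rfl
  | cons l t ih =>
      show (if pvCp p l = [] then pvCp p l else pvBLoop t (pvCp p l)) = _
      by_cases h : pvCp p l = []
      · simp [h, List.foldl, foldl_pvCp_nil]
      · simp [h, List.foldl, ih]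

-- a bad line ([] or wrong head) kills the fold started from x :: hs
theorem foldl_pvCp_bad (x : Char) (hs : List Char) (t : List (List Char))
    (hbad : ∃ l ∈ t, ∀ ls, l ≠ x :: ls) : t.foldl pvCp (x :: hs) = [] := by
  induction t generalizing hs with
  | nil => rcases hbad with ⟨l, hl, _⟩; cases hl
  | cons l t ih =>
      rcases l with _ | ⟨y, ls⟩
      · simp [List.foldl, pvCp_nil_right, foldl_pvCp_nil]
      · by_cases hy : y = x
        · subst hy
          rcases hbad with ⟨l', hl', hbadl'⟩
          rcases List.mem_cons.1 hl' with h | h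
          · exact absurd h.symm (fun h => hbadl' ls h.symm)
          · simp only [List.foldl, pvCp_cons, if_pos rfl]
            exact ih _ ⟨l', h, hbadl'⟩
        · simp [List.foldl, pvCp_cons, Ne.symm hy, foldl_pvCp_nil]

-- all lines start with x: the fold peels x and continues on the tails
theorem foldl_pvCp_good (x : Char) (hs : List Char) (t : List (List Char))
    (hgood : ∀ l ∈ t, ∃ ls, l = x :: ls) :
    t.foldl pvCp (x :: hs) = x :: (t.map List.tail).foldl pvCp hs := by
  induction t generalizing hs with
  | nil => rfl
  | cons l t ih =>
      obtain ⟨ls, rfl⟩ := hgood l (by simp)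
      simp only [List.foldl, List.map, pvCp_cons, if_pos rfl, List.tail]
      exact ih _ (fun l hl => hgood l (by simp [hl]))

-- len(set(x :: cs)) == 1  ↔  everything equals x
theorem foldl_add_singleton (x : Char) (cs : List Char) (h : ∀ c ∈ cs, c = x) :
    cs.foldl PySem.Set.add [x] = [x] := by
  induction cs with
  | nil => rfl
  | cons c cs ih =>
      have hc := h c (by simp)
      subst hc
      have hadd : PySem.Set.add [c] c = [c] := by
        simp [PySem.Set.add, PySem.Set.contains]
      simp only [List.foldl, hadd]
      exact ih (fun d hd => h d (by simp [hd]))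

theorem set_len_one_iff (x : Char) (cs : List Char) :
    PySem.Set.len (PySem.Set.ofList (x :: cs)) = 1 ↔ ∀ c ∈ cs, c = x := by
  constructor
  · intro h c hc
    have hlen : (PySem.Set.ofList (x :: cs)).length = 1 := by
      simpa [PySem.Set.len] using h
    obtain ⟨y, hy⟩ := List.length_eq_one_iff.mp hlen
    have hx : x ∈ PySem.Set.ofList (x :: cs) := (PySem.Set.mem_ofList _ _).2 (by simp)
    have hcm : c ∈ PySem.Set.ofList (x :: cs) := (PySem.Set.mem_ofList _ _).2 (by simp [hc])
    rw [hy] at hx hcm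
    simp at hx hcm
    rw [hcm, hx]
  · intro h
    have hof : PySem.Set.ofList (x :: cs) = [x] := by
      rw [PySem.Set.ofList_eq_foldl]
      have hadd0 : PySem.Set.add ([] : PySem.Set Char) x = [x] := by
        simp [PySem.Set.add, PySem.Set.contains]
      simp only [List.foldl, hadd0]
      exact foldl_add_singleton x cs h
    simp [PySem.Set.len, hof]

theorem pvZip_nil_of_bad (ls : List (List Char)) (h : ¬ (ls ≠ [] ∧ ∀ l ∈ ls, l ≠ [])) :
    pvZip ls = [] := by rw [pvZip, dif_neg h]

theorem pvZip_cons (ls : List (List Char)) (h : ls ≠ [] ∧ ∀ l ∈ ls, l ≠ []) :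
    pvZip ls = (ls.map (·.headD ' ')) :: pvZip (ls.map List.tail) := by
  rw [pvZip, dif_pos h]

-- main bridge: A's column loop equals B's row fold
theorem pvMain (h : List Char) (t : List (List Char)) (acc : List Char) :
    pvALoop (pvZip (h :: t)) acc = acc ++ t.foldl pvCp h := by
  induction h generalizing t acc with
  | nil =>
      rw [pvZip_nil_of_bad _ (by simp)]
      simp [pvALoop, foldl_pvCp_nil]
  | cons x hs ih =>
      by_cases hne : ∀ l ∈ t, l ≠ []
      · rw [pvZip_cons _ ⟨by simp, by simpa using hne⟩]
        simp only [List.map, List.headD, List.tail]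
        by_cases huni : ∀ l ∈ t, l.headD ' ' = x
        · have hgood : ∀ l ∈ t, ∃ ls, l = x :: ls := by
            intro l hl
            rcases l with _ | ⟨y, ls⟩
            · exact absurd rfl (hne [] hl)
            · exact ⟨ls, by have := huni _ hl; simp at this; rw [this]⟩
          have hset : PySem.Set.len (PySem.Set.ofList (x :: t.map (·.headD ' '))) = 1 := by
            rw [set_len_one_iff]; intro c hc
            obtain ⟨l, hl, rfl⟩ := List.mem_map.1 hc
            exact huni l hl
          show pvALoop ((x :: t.map (·.headD ' ')) :: _) acc = _
          rw [pvALoop, if_pos hset]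
          have hget : ((PySem.List.pyGet? (x :: t.map (·.headD ' ')) (0 : Int)).getD ' ') = x := by
            simp [PySem.List.pyGet?, PySem.List.pyIdx?]
          rw [hget, ih (t.map List.tail) (acc ++ [x])]
          rw [foldl_pvCp_good x hs t hgood]
          simp
        · push_neg at huni
          obtain ⟨l, hl, hbad⟩ := huni
          have hbad' : ∃ l ∈ t, ∀ ls, l ≠ x :: ls := by
            refine ⟨l, hl, fun ls hh => ?_⟩
            rw [hh] at hbad; simp at hbad
          have hset : ¬ PySem.Set.len (PySem.Set.ofList (x :: t.map (·.headD ' '))) = 1 := by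
            rw [set_len_one_iff]
            push_neg
            exact ⟨l.headD ' ', List.mem_map.2 ⟨l, hl, rfl⟩, hbad⟩
          show pvALoop ((x :: t.map (·.headD ' ')) :: _) acc = _
          rw [pvALoop, if_neg hset, foldl_pvCp_bad x hs t hbad']
          simp
      · push_neg at hne
        obtain ⟨l, hl, rfl⟩ := hne
        rw [pvZip_nil_of_bad _ (by push_neg; intro _; exact ⟨[], List.mem_cons_of_mem _ hl, rfl⟩)]
        have : t.foldl pvCp (x :: hs) = [] := by
          apply foldl_pvCp_bad
          exact ⟨[], hl, fun ls => by simp⟩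
        simp [pvALoop, this]

-- ===== VERDICT (by name: the statement is the Claim_ definition above) =====
theorem prefix_width_spec : Claim_equal_prefix_width := by
  intro text _
  unfold Spec_prefix_width prefix_width prefix_width_alt
  rcases hsplit : PySem.Chars.splitOn text.toList ['\n'] with _ | ⟨h, t⟩
  · simp [pvBLoop, PySem.List.pyGet?, PySem.List.pyIdx?, PySem.List.slice]
  · simp only [if_neg (by simp : ¬ (h :: t : List (List Char)) = [])]
    have hget : ((PySem.List.pyGet? (h :: t) (0 : Int)).getD []) = h := by
      simp [PySem.List.pyGet?, PySem.List.pyIdx?]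
    rw [hget, PySem.List.slice_from_one, pvBLoop_eq_foldl]
    show ((pvALoop (pvZip (h :: t)) []).length : Int) = _
    rw [pvMain h t []]
    simp
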